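-- pv_equiv track=rewrite | github.com/robertcprice/nQPU | sdk/python/nqpu/emulator/qpu.py | _count_native_gates
-- ===== SOURCE A (Python) =====
-- _1Q_GATES = frozenset(
--     ("h", "x", "y", "z", "s", "sdg", "t", "tdg", "sx", "rx", "ry", "rz")
-- )
--
-- _3Q_GATES = frozenset(("ccx", "toffoli", "ccz"))
--
-- def _count_native_gates(gate_list: list) -> int:
--     """Count total native gates after decomposition.
--
--     SWAP decomposes to 3 CNOTs.  Toffoli on non-neutral-atom backends
--     decomposes to ~15 primitive gates.  On neutral-atom backends with
--     native CCZ / Toffoli, the 3Q gate counts as 1.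
--     """
--     count = 0
--     for gate in gate_list:
--         name = str(gate[0]).lower()
--         if name in _1Q_GATES:
--             count += 1
--         elif name in ("cx", "cnot", "cz"):
--             count += 1
--         elif name == "swap":
--             count += 3
--         elif name in _3Q_GATES:
--             # Neutral-atom can execute natively; others decompose.
--             # Conservative count: use 15 for decomposed Toffoli.
--             count += 15
--     return count
-- ===== SOURCE B (Python) =====
-- _GATE_TABLE = (
--     ("h", 1), ("x", 1), ("y", 1), ("z", 1), ("s", 1), ("sdg", 1),
--     ("t", 1), ("tdg", 1), ("sx", 1), ("rx", 1), ("ry", 1), ("rz", 1),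
--     ("cx", 1), ("cnot", 1), ("cz", 1),
--     ("swap", 3),
--     ("ccx", 15), ("toffoli", 15), ("ccz", 15),
-- )
--
--
-- def _count_native_gates(gate_list: list) -> int:
--     """Count total native gates after decomposition.
--
--     Two stages: histogram the lower-cased gate names once, then
--     aggregate weight * multiplicity over the fixed weight table
--     (the second loop runs over the 19 table entries, not the input).
--     """
--     counts = {}
--     for gate in gate_list:
--         name = str(gate[0]).lower()
--         counts[name] = counts.get(name, 0) + 1
--     total = 0
--     for name, weight in _GATE_TABLE:
--         total += weight * counts.get(name, 0)
--     return total
-- ===== Notes on version B (the rewrite author's own statement) =====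
-- stated objective: alternative
-- what changed: Replaced the per-element if/elif classification with a two-stage aggregation: first build a histogram (name -> multiplicity) of lower-cased gate names, then sum weight*multiplicity over the fixed 19-entry weight table, so the second loop iterates over the table rather than the input and no per-element branching occurs.
import Mathlib
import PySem

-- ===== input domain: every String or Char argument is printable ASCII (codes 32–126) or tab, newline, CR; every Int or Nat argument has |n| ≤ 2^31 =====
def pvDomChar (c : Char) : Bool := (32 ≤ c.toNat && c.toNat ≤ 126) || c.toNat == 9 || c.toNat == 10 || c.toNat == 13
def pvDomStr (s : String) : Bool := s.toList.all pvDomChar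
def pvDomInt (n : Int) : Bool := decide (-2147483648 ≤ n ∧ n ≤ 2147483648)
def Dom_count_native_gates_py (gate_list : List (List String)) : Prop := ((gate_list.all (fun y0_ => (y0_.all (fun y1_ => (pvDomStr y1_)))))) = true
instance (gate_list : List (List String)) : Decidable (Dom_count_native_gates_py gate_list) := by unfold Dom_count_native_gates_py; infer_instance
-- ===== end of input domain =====

-- B replaces A's per-element branch cascade with a two-stage aggregation: histogram the
-- lower-cased names, then sum weight*multiplicity over a fixed weight table (objective: alternative).

-- ===== PORT A =====
def count_native_gates_py (gate_list : List (List String)) : Int :=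
  gate_list.foldl
    (fun count gate =>
      let name := PySem.Str.lower (PySem.List.pyGetD gate 0 "")
      if name ∈ ["h", "x", "y", "z", "s", "sdg", "t", "tdg", "sx", "rx", "ry", "rz"] then
        count + 1
      else if name ∈ ["cx", "cnot", "cz"] then
        count + 1
      else if name = "swap" then
        count + 3
      else if name ∈ ["ccx", "toffoli", "ccz"] then
        count + 15
      else
        count)
    0

-- ===== PORT B =====
def pvGateTable : List (String × Int) :=
  [("h", 1), ("x", 1), ("y", 1), ("z", 1), ("s", 1), ("sdg", 1),
   ("t", 1), ("tdg", 1), ("sx", 1), ("rx", 1), ("ry", 1), ("rz", 1),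
   ("cx", 1), ("cnot", 1), ("cz", 1),
   ("swap", 3),
   ("ccx", 15), ("toffoli", 15), ("ccz", 15)]

def count_native_gates_py_alt (gate_list : List (List String)) : Int :=
  let counts : PySem.Dict String Int :=
    gate_list.foldl
      (fun d gate =>
        let name := PySem.Str.lower (PySem.List.pyGetD gate 0 "")
        d.insert name (d.getD name 0 + 1))
      PySem.Dict.empty
  pvGateTable.foldl (fun total p => total + p.2 * counts.getD p.1 0) 0

-- ===== PRECONDITION & SPEC =====
-- Pre_ excludes inputs containing an empty inner list, on which Python A raises IndexError at gate[0].
def Pre_count_native_gates_py (gate_list : List (List String)) : Prop :=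
  ∀ g ∈ gate_list, g ≠ []
instance (gate_list : List (List String)) : Decidable (Pre_count_native_gates_py gate_list) := by unfold Pre_count_native_gates_py; infer_instance

def pvWitness_count_native_gates_py : List (List String) := [["h"], ["SWAP", "0"], ["foo"]]

def Spec_count_native_gates_py (gate_list : List (List String)) (out : Int) : Prop := out = count_native_gates_py_alt gate_list
instance (gate_list : List (List String)) (out : Int) : Decidable (Spec_count_native_gates_py gate_list out) := by unfold Spec_count_native_gates_py; infer_instance

-- ===== CLAIM (what is proved, stated in full; the proofs are below) =====
def Claim_equal_count_native_gates_py : Prop := ∀ (gate_list : List (List String)), Dom_count_native_gates_py gate_list → Pre_count_native_gates_py gate_list → Spec_count_native_gates_py gate_list (count_native_gates_py gate_list)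

-- ===== LEMMAS AND PROOFS =====

-- the weight A's branch cascade assigns to a (lower-cased) gate name
def pvCascadeW (n : String) : Int :=
  if n ∈ ["h", "x", "y", "z", "s", "sdg", "t", "tdg", "sx", "rx", "ry", "rz"] then 1
  else if n ∈ ["cx", "cnot", "cz"] then 1
  else if n = "swap" then 3
  else if n ∈ ["ccx", "toffoli", "ccz"] then 15
  else 0

-- one string's contribution to B's table aggregation equals A's cascade weight
lemma pv_point (n : String) :
    (pvGateTable.map (fun p => p.2 * (if p.1 = n then (1 : Int) else 0))).sum = pvCascadeW n := by
  unfold pvCascadeW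
  split_ifs with h1 h2 h3 h4
  · simp only [List.mem_cons, List.not_mem_nil, or_false] at h1
    rcases h1 with rfl|rfl|rfl|rfl|rfl|rfl|rfl|rfl|rfl|rfl|rfl|rfl <;> decide
  · simp only [List.mem_cons, List.not_mem_nil, or_false] at h2
    rcases h2 with rfl|rfl|rfl <;> decide
  · subst h3; decide
  · simp only [List.mem_cons, List.not_mem_nil, or_false] at h4
    rcases h4 with rfl|rfl|rfl <;> decide
  · simp only [List.mem_cons, List.not_mem_nil, or_false, not_or] at h1 h2 h4
    obtain ⟨b1, b2, b3, b4, b5, b6, b7, b8, b9, b10, b11, b12⟩ := h1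
    obtain ⟨c1, c2, c3⟩ := h2
    obtain ⟨d1, d2, d3⟩ := h4
    simp [pvGateTable, Ne.symm b1, Ne.symm b2, Ne.symm b3, Ne.symm b4, Ne.symm b5,
      Ne.symm b6, Ne.symm b7, Ne.symm b8, Ne.symm b9, Ne.symm b10, Ne.symm b11, Ne.symm b12,
      Ne.symm c1, Ne.symm c2, Ne.symm c3, Ne.symm h3, Ne.symm d1, Ne.symm d2, Ne.symm d3]

-- B's table aggregation over the multiset of names equals the sum of A's cascade weights
lemma pv_main (ns : List String) :
    (pvGateTable.map (fun p => p.2 * (ns.count p.1 : Int))).sum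
      = (ns.map pvCascadeW).sum := by
  induction ns with
  | nil => simp
  | cons n rest ih =>
    have hcount : ∀ p : String × Int,
        ((n :: rest).count p.1 : Int)
          = (rest.count p.1 : Int) + (if p.1 = n then (1 : Int) else 0) := by
      intro p
      rcases eq_or_ne p.1 n with h | h
      · subst h; simp
      · simp [h, Ne.symm h]
    calc (pvGateTable.map (fun p => p.2 * ((n :: rest).count p.1 : Int))).sum
        = (pvGateTable.map (fun p =>
            p.2 * (rest.count p.1 : Int) + p.2 * (if p.1 = n then (1 : Int) else 0))).sum := by
          congr 1; apply List.map_congr_left; intro p _; rw [hcount p]; ring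
      _ = (pvGateTable.map (fun p => p.2 * (rest.count p.1 : Int))).sum
            + (pvGateTable.map (fun p => p.2 * (if p.1 = n then (1 : Int) else 0))).sum := by
          rw [← List.sum_map_add]
      _ = (rest.map pvCascadeW).sum + pvCascadeW n := by rw [ih, pv_point]
      _ = ((n :: rest).map pvCascadeW).sum := by simp [add_comm]

-- A's fold is the sum of cascade weights of the names
lemma pv_A_eq (gate_list : List (List String)) :
    count_native_gates_py gate_list
      = ((gate_list.map (fun g => PySem.Str.lower (PySem.List.pyGetD g 0 ""))).map pvCascadeW).sum := by
  unfold count_native_gates_py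
  rw [show (fun (count : Int) (gate : List String) =>
      let name := PySem.Str.lower (PySem.List.pyGetD gate 0 "")
      if name ∈ ["h", "x", "y", "z", "s", "sdg", "t", "tdg", "sx", "rx", "ry", "rz"] then
        count + 1
      else if name ∈ ["cx", "cnot", "cz"] then count + 1
      else if name = "swap" then count + 3
      else if name ∈ ["ccx", "toffoli", "ccz"] then count + 15
      else count) =
      (fun (count : Int) (gate : List String) =>
        count + pvCascadeW (PySem.Str.lower (PySem.List.pyGetD gate 0 ""))) from by
        funext c g
        show (if PySem.Str.lower (PySem.List.pyGetD g 0 "") ∈ _ then c + 1 else _) = _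
        unfold pvCascadeW
        split_ifs <;> ring]
  rw [PySem.List.foldl_add, zero_add, List.map_map]
  rfl

-- B's histogram lookup is the multiset count of names
lemma pv_B_eq (gate_list : List (List String)) :
    count_native_gates_py_alt gate_list
      = (pvGateTable.map (fun p =>
          p.2 * (((gate_list.map (fun g => PySem.Str.lower (PySem.List.pyGetD g 0 ""))).count p.1 : Int)))).sum := by
  unfold count_native_gates_py_alt
  rw [PySem.List.foldl_add, zero_add]
  congr 1
  apply List.map_congr_left
  intro p _
  congr 1
  rw [show (fun (d : PySem.Dict String Int) (gate : List String) =>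
      let name := PySem.Str.lower (PySem.List.pyGetD gate 0 "")
      d.insert name (d.getD name 0 + 1))
      = (fun (d : PySem.Dict String Int) (gate : List String) =>
          d.insert (PySem.Str.lower (PySem.List.pyGetD gate 0 ""))
            (d.getD (PySem.Str.lower (PySem.List.pyGetD gate 0 "")) 0 + 1)) from rfl]
  rw [← List.foldl_map (f := fun g => PySem.Str.lower (PySem.List.pyGetD g 0 ""))
    (g := fun (d : PySem.Dict String Int) n => d.insert n (d.getD n 0 + 1))]
  rw [PySem.Dict.getD_foldl_insert_add_one]
  simp [PySem.Dict.getD_empty]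

-- ===== VERDICT (by name: the statement is the Claim_ definition above) =====
theorem count_native_gates_py_spec : Claim_equal_count_native_gates_py := by
  intro gate_list _ _
  unfold Spec_count_native_gates_py
  rw [pv_A_eq, pv_B_eq, pv_main]
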